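-- pv_equiv track=rewrite | github.com/eaindome/Programming | Advent_of_Code/2022/Day-1/Solution-2.py | elf_with_highest_calories
-- ===== SOURCE A (Python) =====
-- def elf_with_highest_calories(input_text):
--     elf_inventories = []
--     current_inventory = []
--     lines = input_text.strip().split('\n')
--
--     for line in lines:
--         if line.strip():
--             current_inventory.append(int(line))
--         else:
--             if current_inventory:
--                 elf_inventories.append(current_inventory)
--             current_inventory = []
--
--     if current_inventory:
--         elf_inventories.append(current_inventory)
--
--     elf_calories = [sum(inventory) for inventory in elf_inventories]
--
--     # Find the Elf with the most Calories and their total Calories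
--     max_calories = max(elf_calories)
--
--     max_calories_elf_index = elf_calories.index(max_calories)
--
--     return max_calories, max_calories_elf_index+1
-- ===== SOURCE B (Python) =====
-- def elf_with_highest_calories(input_text):
--     best = None  # (calories, 1-based elf index), first maximal elf wins via strict >
--     current = 0
--     has_items = False
--     elf_count = 0
--     for line in input_text.strip().split('\n'):
--         if line.strip():
--             current += int(line)
--             has_items = True
--         else:
--             if has_items:
--                 elf_count += 1
--                 if best is None or current > best[0]:
--                     best = (current, elf_count)
--             current = 0
--             has_items = False
--     if has_items:
--         elf_count += 1
--         if best is None or current > best[0]: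
--             best = (current, elf_count)
--     if best is None:
--         raise ValueError("no elves in input")
--     return best
-- ===== Notes on version B (the rewrite author's own statement) =====
-- stated objective: simpler
-- what changed: Replaces A's three passes and intermediate lists (build list-of-inventories, map to sums, max, then .index rescan) with a single fused loop that keeps only a running sum, an elf counter and the best (sum, index) pair, using strict > so the first maximal elf wins.
import Mathlib
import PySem

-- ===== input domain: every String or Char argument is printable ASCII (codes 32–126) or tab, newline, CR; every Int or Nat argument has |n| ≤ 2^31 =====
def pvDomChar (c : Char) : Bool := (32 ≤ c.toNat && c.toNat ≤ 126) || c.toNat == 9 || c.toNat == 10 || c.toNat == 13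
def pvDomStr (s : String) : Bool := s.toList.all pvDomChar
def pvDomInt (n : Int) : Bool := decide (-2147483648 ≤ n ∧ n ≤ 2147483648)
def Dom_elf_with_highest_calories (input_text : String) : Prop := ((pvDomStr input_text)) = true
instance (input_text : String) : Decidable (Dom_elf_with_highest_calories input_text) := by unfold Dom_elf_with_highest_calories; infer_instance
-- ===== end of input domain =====

-- B replaces A's intermediate lists and rescans by one fused loop keeping only the running sum and the best (sum, index) pair (objective: simpler).

-- ===== PORT A =====
-- loop body of A: append to current inventory on a non-blank line, else close the group
def pvAStep (st : List (List Int) × List Int) (line : String) : List (List Int) × List Int :=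
  if PySem.Str.strip line ≠ "" then
    (st.1, st.2 ++ [(PySem.Int.ofStr? line).getD 0])
  else if st.2 ≠ [] then (st.1 ++ [st.2], ([] : List Int))
  else (st.1, ([] : List Int))

def elf_with_highest_calories (input_text : String) : Int × Int :=
  let lines := (PySem.Str.split? (PySem.Str.strip input_text) "\n").getD []
  let st := lines.foldl pvAStep ([], [])
  let elf_inventories := if st.2 ≠ [] then st.1 ++ [st.2] else st.1
  let elf_calories := elf_inventories.map List.sum
  let max_calories := (PySem.List.max? elf_calories (fun x => x)).getD 0
  let max_calories_elf_index := (PySem.List.index? elf_calories max_calories).getD 0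
  (max_calories, (max_calories_elf_index : Int) + 1)

-- ===== PORT B =====
-- 'if best is None or current > best[0]: best = (current, elf_count)'
def pvBump (best : Option (Int × Int)) (current k : Int) : Option (Int × Int) :=
  match best with
  | none => some (current, k)
  | some b => if current > b.1 then some (current, k) else some b

-- loop body of B over state (best, current, has_items, elf_count)
def pvBStep (st : Option (Int × Int) × Int × Bool × Int) (line : String) :
    Option (Int × Int) × Int × Bool × Int :=
  if PySem.Str.strip line ≠ "" then
    (st.1, st.2.1 + (PySem.Int.ofStr? line).getD 0, true, st.2.2.2)
  else if st.2.2.1 then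
    (pvBump st.1 st.2.1 (st.2.2.2 + 1), 0, false, st.2.2.2 + 1)
  else (st.1, 0, false, st.2.2.2)

def elf_with_highest_calories_alt (input_text : String) : Int × Int :=
  let lines := (PySem.Str.split? (PySem.Str.strip input_text) "\n").getD []
  let st := lines.foldl pvBStep (none, 0, false, 0)
  let best := if st.2.2.1 then pvBump st.1 st.2.1 (st.2.2.2 + 1) else st.1
  best.getD (0, 0)

-- ===== PRECONDITION & SPEC =====
-- Pre_ excludes exactly the inputs where the Python A raises: inputs with no non-blank line
-- (max([]) raises ValueError) and inputs with a non-blank line that int() cannot parse (ValueError).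
def Pre_elf_with_highest_calories (input_text : String) : Prop :=
  let lines := (PySem.Str.split? (PySem.Str.strip input_text) "\n").getD []
  (∃ l ∈ lines, PySem.Str.strip l ≠ "") ∧
  (∀ l ∈ lines, PySem.Str.strip l ≠ "" → (PySem.Int.ofStr? l).isSome)
instance (input_text : String) : Decidable (Pre_elf_with_highest_calories input_text) := by
  unfold Pre_elf_with_highest_calories; infer_instance

def pvWitness_elf_with_highest_calories : String := "100\n200\n\n300"

def Spec_elf_with_highest_calories (input_text : String) (out : Int × Int) : Prop := out = elf_with_highest_calories_alt input_text
instance (input_text : String) (out : Int × Int) : Decidable (Spec_elf_with_highest_calories input_text out) := by unfold Spec_elf_with_highest_calories; infer_instance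

-- ===== CLAIM (what is proved, stated in full; the proofs are below) =====
def Claim_equal_elf_with_highest_calories : Prop := ∀ (input_text : String), Dom_elf_with_highest_calories input_text → Pre_elf_with_highest_calories input_text → Spec_elf_with_highest_calories input_text (elf_with_highest_calories input_text)

-- ===== LEMMAS AND PROOFS =====

-- the best pair B's loop has built after scanning the group sums `cals`, 1-based from k
def pvBestAux : List Int → Int → Option (Int × Int) → Option (Int × Int)
  | [], _, b => b
  | c :: t, k, b => pvBestAux t (k + 1) (pvBump b c (k + 1))

theorem pvBestAux_append (xs : List Int) (c k : Int) (b : Option (Int × Int)) :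
    pvBestAux (xs ++ [c]) k b = pvBump (pvBestAux xs k b) c (k + xs.length + 1) := by
  induction xs generalizing k b with
  | nil => simp [pvBestAux]
  | cons x t ih =>
      simp only [List.cons_append, pvBestAux, ih, List.length_cons]
      congr 1
      push_cast
      ring

-- the abstraction function from A's loop state to B's loop state
def pvPhi (st : List (List Int) × List Int) : Option (Int × Int) × Int × Bool × Int :=
  (pvBestAux (st.1.map List.sum) 0 none, st.2.sum, decide (st.2 ≠ []), (st.1.length : Int))

theorem pvStep_comm (st : List (List Int) × List Int) (line : String) :
    pvBStep (pvPhi st) line = pvPhi (pvAStep st line) := by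
  by_cases h : PySem.Str.strip line ≠ ""
  · simp [pvBStep, pvAStep, pvPhi, h]
  · by_cases h2 : st.2 ≠ []
    · simp only [pvBStep, pvAStep, pvPhi, h, h2, decide_not, ite_false]
      norm_num [if_neg h2]
      rw [pvBestAux_append]
      congr 1
      simp only [List.length_map]
      ring
    · simp [pvBStep, pvAStep, pvPhi, h, h2]

theorem pvFold_comm (lines : List String) (st : List (List Int) × List Int) :
    lines.foldl pvBStep (pvPhi st) = pvPhi (lines.foldl pvAStep st) := by
  induction lines generalizing st with
  | nil => rfl
  | cons l ls ih => simp only [List.foldl_cons, pvStep_comm, ih]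

-- once a non-blank line has been seen (or the state is already non-empty), A's final state is non-empty
theorem pvFold_nonempty (lines : List String) (st : List (List Int) × List Int)
    (h : (∃ l ∈ lines, PySem.Str.strip l ≠ "") ∨ st.1 ≠ [] ∨ st.2 ≠ []) :
    (lines.foldl pvAStep st).1 ≠ [] ∨ (lines.foldl pvAStep st).2 ≠ [] := by
  induction lines generalizing st with
  | nil =>
      rcases h with ⟨l, hl, _⟩ | h
      · exact absurd hl (List.not_mem_nil)
      · exact h
  | cons l ls ih =>
      simp only [List.foldl_cons]
      apply ih
      by_cases hl : PySem.Str.strip l ≠ ""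
      · right; right; simp [pvAStep, hl]
      · by_cases h2 : st.2 ≠ []
        · right; left; simp [pvAStep, hl, h2]
        · rcases h with ⟨l', hl', hs⟩ | h1 | h2'
          · rcases List.mem_cons.mp hl' with rfl | hmem
            · exact absurd hs hl
            · exact Or.inl ⟨l', hmem, hs⟩
          · right; left; simpa [pvAStep, hl, h2]
          · exact absurd h2' h2
      
-- B's fold over the group sums computes exactly (max, first index of max + 1)
theorem pvBestAux_spec (xs : List Int) (hne : xs ≠ []) :
    ∃ (mx : Int) (idx : Nat), PySem.List.max? xs (fun x => x) = some mx ∧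
      PySem.List.index? xs mx = some idx ∧
      pvBestAux xs 0 none = some (mx, (idx : Int) + 1) := by
  induction xs using List.reverseRecOn with
  | nil => exact absurd rfl hne
  | append_singleton xs c ih =>
      by_cases hxs : xs = []
      · subst hxs
        refine ⟨c, 0, ?_, ?_, ?_⟩
        · simp [PySem.List.max?_id_cons]
        · rw [List.nil_append, PySem.List.index?_cons_self]
        · simp [pvBestAux, pvBump]
      · obtain ⟨mx, idx, h1, h2, h3⟩ := ih hxs
        have hmem : mx ∈ xs := PySem.List.max?_mem h1
        have hmax : ∀ y ∈ xs, y ≤ mx := by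
          intro y hy; exact PySem.List.max?_isMax h1 y hy
        have hb : pvBestAux (xs ++ [c]) 0 none
            = pvBump (some (mx, (idx : Int) + 1)) c ((xs.length : Int) + 1) := by
          rw [pvBestAux_append, h3]; norm_num
        obtain ⟨x, t, rfl⟩ := List.exists_cons_of_ne_nil hxs
        have hmx : t.foldl max x = mx := by
          have := h1
          rw [PySem.List.max?_id_cons] at this
          exact Option.some.inj this
        have hmax' : PySem.List.max? ((x :: t) ++ [c]) (fun x => x) = some (max mx c) := by
          rw [List.cons_append, PySem.List.max?_id_cons, List.foldl_append]
          simp [hmx]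
        by_cases hc : c > mx
        · refine ⟨c, (x :: t).length, ?_, ?_, ?_⟩
          · rw [hmax', max_eq_right (le_of_lt hc)]
          · apply PySem.List.index?_append_singleton_self
            intro hmemc
            exact absurd (hmax c hmemc) (not_le.mpr hc)
          · rw [hb]; simp [pvBump, hc]
        · refine ⟨mx, idx, ?_, ?_, ?_⟩
          · rw [hmax', max_eq_left (not_lt.mp hc)]
          · rw [PySem.List.index?_append_of_mem _ hmem, h2]
          · rw [hb]; simp [pvBump, hc]

-- the common core: both ports applied to the already-split list of lines agree
theorem pvCore (lines : List String) (hex : ∃ l ∈ lines, PySem.Str.strip l ≠ "") :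
    (let st := lines.foldl pvAStep ([], []);
     let elf_inventories := if st.2 ≠ [] then st.1 ++ [st.2] else st.1;
     let elf_calories := elf_inventories.map List.sum;
     let max_calories := (PySem.List.max? elf_calories (fun x => x)).getD 0;
     let max_calories_elf_index := (PySem.List.index? elf_calories max_calories).getD 0;
     ((max_calories, (max_calories_elf_index : Int) + 1) : Int × Int))
    = (let st := lines.foldl pvBStep (none, 0, false, 0);
       let best := if st.2.2.1 then pvBump st.1 st.2.1 (st.2.2.2 + 1) else st.1;
       best.getD (0, 0)) := by
  have hinit : ((none, 0, false, (0 : Int)) : Option (Int × Int) × Int × Bool × Int)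
      = pvPhi ([], []) := by rfl
  dsimp only
  rw [hinit, pvFold_comm]
  set stA := lines.foldl pvAStep ([], []) with hstA
  set invs : List (List Int) := if stA.2 ≠ [] then stA.1 ++ [stA.2] else stA.1 with hinvs
  have hbest : (if (pvPhi stA).2.2.1 then pvBump (pvPhi stA).1 (pvPhi stA).2.1 ((pvPhi stA).2.2.2 + 1) else (pvPhi stA).1)
      = pvBestAux (invs.map List.sum) 0 none := by
    by_cases h2 : stA.2 ≠ []
    · simp only [pvPhi]
      rw [decide_eq_true h2, if_pos rfl, hinvs, if_pos h2, List.map_append, List.map_cons,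
        List.map_nil, pvBestAux_append]
      congr 1
      simp only [List.length_map]
      ring
    · simp [pvPhi, h2, hinvs]
  rw [hbest]
  have hne : invs ≠ [] := by
    have := pvFold_nonempty lines ([], []) (Or.inl hex)
    rw [← hstA] at this
    rcases this with h | h
    · by_cases h2 : stA.2 ≠ [] <;> simp [hinvs, h2, h]
    · simp [hinvs, h]
  have hcals : invs.map List.sum ≠ [] := by simpa using hne
  obtain ⟨mx, idx, h1, h2, h3⟩ := pvBestAux_spec (invs.map List.sum) hcals
  rw [h1]
  simp only [Option.getD_some]
  rw [h2, h3]
  simp only [Option.getD_some]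

-- ===== VERDICT (by name: the statement is the Claim_ definition above) =====
theorem elf_with_highest_calories_spec : Claim_equal_elf_with_highest_calories := by
  intro input_text _ hpre
  unfold Pre_elf_with_highest_calories at hpre
  unfold Spec_elf_with_highest_calories elf_with_highest_calories elf_with_highest_calories_alt
  exact pvCore _ hpre.1
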